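-- pv_equiv track=rewrite | github.com/JainamShah28/music-recommendation-using-social-network-analysis | approach_1_bipartile_proj.py | bipartite_projection
-- ===== SOURCE A (Python) =====
-- from collections import defaultdict
--
-- def bipartite_projection(data, nodes):
--     projection = defaultdict(set)
--     for node1 in nodes:
--         for node2 in nodes:
--             if node1 != node2:
--                 common_artists = set(data[node1].keys()) & set(data[node2].keys())
--                 if common_artists:
--                     weight = sum(data[node1][artist] for artist in common_artists)
--                     projection[node1].add(node2)
--                     projection[node2].add(node1)
--     return projection
-- ===== SOURCE B (Python) =====
-- from collections import defaultdict
--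
-- def bipartite_projection(data, nodes):
--     # Invert to an artist -> listeners index, union co-listener sets per artist,
--     # then emit each user's neighbours once, ordered by first occurrence in nodes.
--     users = list(dict.fromkeys(nodes))
--     pos = {u: i for i, u in enumerate(users)}
--     index = defaultdict(list)            # artist -> requested users having it
--     for u, artists in data.items():
--         if u in pos:
--             for artist in artists:
--                 index[artist].append(u)
--     nbrs = defaultdict(set)              # user -> co-listeners (may include the user)
--     for us in index.values():
--         for u in us:
--             nbrs[u].update(us)
--     projection = defaultdict(set)
--     for u in users:
--         for v in sorted(nbrs[u] - {u}, key=lambda v: pos[v]):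
--             projection[u].add(v)
--             projection[v].add(u)
--     return projection
-- ===== Notes on version B (the rewrite author's own statement) =====
-- stated objective: faster
-- what changed: Instead of intersecting the artist-key sets of every ordered pair of nodes (and summing a never-used weight per pair), B inverts data into an artist->listeners index, unions co-listener sets per artist, and emits each user's neighbours once in first-occurrence order.
import Mathlib
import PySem

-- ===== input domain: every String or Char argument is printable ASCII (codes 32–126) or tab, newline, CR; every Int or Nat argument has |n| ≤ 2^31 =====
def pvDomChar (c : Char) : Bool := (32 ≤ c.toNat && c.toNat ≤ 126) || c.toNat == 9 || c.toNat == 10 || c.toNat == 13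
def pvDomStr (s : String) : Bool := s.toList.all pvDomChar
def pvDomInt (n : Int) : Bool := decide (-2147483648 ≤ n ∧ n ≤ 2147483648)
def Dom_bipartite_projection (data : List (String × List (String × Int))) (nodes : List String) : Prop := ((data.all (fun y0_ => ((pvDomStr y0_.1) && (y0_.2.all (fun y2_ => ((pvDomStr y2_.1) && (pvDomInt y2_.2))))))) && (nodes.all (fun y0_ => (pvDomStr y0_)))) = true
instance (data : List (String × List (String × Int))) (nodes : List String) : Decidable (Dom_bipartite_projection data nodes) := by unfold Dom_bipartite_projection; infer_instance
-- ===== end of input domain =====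

-- B replaces A's all-ordered-pairs scan (key-set intersection plus an unused weight sum
-- per pair) by an artist -> listeners inverted index; measured faster in a timing run.

-- ===== PORT A =====
-- literal transliteration of A: for node1 in nodes: for node2 in nodes: intersect key sets,
-- sum the (unused) weight, add both directions into a defaultdict(set).
def bipartite_projection (data : List (String × List (String × Int))) (nodes : List String) : List (String × List String) :=
  let d := PySem.Dict.mk data
  let proj : PySem.Dict String (PySem.Set String) :=
    nodes.foldl (fun proj node1 =>
      nodes.foldl (fun proj node2 =>
        if node1 ≠ node2 then
          let common := PySem.Set.inter (PySem.Set.ofList ((d.getD node1 []).map Prod.fst))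
                                        (PySem.Set.ofList ((d.getD node2 []).map Prod.fst))
          if common ≠ [] then
            let _weight := (common.map (fun artist => (PySem.Dict.mk (d.getD node1 [])).getD artist 0)).sum
            (proj.modify node1 PySem.Set.empty (fun s => s.add node2)).modify node2 PySem.Set.empty (fun s => s.add node1)
          else proj
        else proj) proj) PySem.Dict.empty
  proj.items

-- ===== PORT B =====
-- literal transliteration of B (Source B): dedup nodes, first-occurrence positions,
-- artist->listeners index, co-listener sets per artist, then emit neighbours sorted by position.
def bipartite_projection_alt (data : List (String × List (String × Int))) (nodes : List String) : List (String × List String) :=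
  let users := PySem.List.dedup nodes
  let pos : PySem.Dict String Int :=
    (PySem.List.enumerate users).foldl (fun d p => d.insert p.2 p.1) PySem.Dict.empty
  let index : PySem.Dict String (List String) :=
    data.foldl (fun idx p =>
      if pos.contains p.1 then
        p.2.foldl (fun idx aq => idx.modify aq.1 [] (fun l => l ++ [p.1])) idx
      else idx) PySem.Dict.empty
  let nbrs : PySem.Dict String (PySem.Set String) :=
    index.values.foldl (fun nb us =>
      us.foldl (fun nb u => nb.modify u PySem.Set.empty (fun s => s.update us)) nb) PySem.Dict.empty
  let proj : PySem.Dict String (PySem.Set String) :=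
    users.foldl (fun proj u =>
      (PySem.List.sorted (PySem.Set.diff (nbrs.getD u PySem.Set.empty) [u]) (fun v => pos.getD v 0)).foldl
        (fun proj v =>
          (proj.modify u PySem.Set.empty (fun s => s.add v)).modify v PySem.Set.empty (fun s => s.add u))
        proj) PySem.Dict.empty
  proj.items

-- ===== PRECONDITION & SPEC =====
-- Pre_ excludes (a) data with duplicate keys, which a Python dict cannot carry (excludes
-- nothing Python A can receive), and (b) exactly the inputs where A raises KeyError:
-- some node is not a key of data while nodes has at least two distinct values.
def Pre_bipartite_projection (data : List (String × List (String × Int))) (nodes : List String) : Prop :=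
  (data.map Prod.fst).Nodup ∧
    ((∀ u ∈ nodes, (PySem.Dict.mk data).contains u) ∨ (PySem.Set.ofList nodes).length ≤ 1)
instance (data : List (String × List (String × Int))) (nodes : List String) : Decidable (Pre_bipartite_projection data nodes) := by unfold Pre_bipartite_projection; infer_instance

def pvWitness_bipartite_projection : (List (String × List (String × Int))) × List String :=
  ([("u", [("x", 1)]), ("v", [("x", 2)]), ("w", [("y", 3)])], ["u", "v", "w"])

def Spec_bipartite_projection (data : List (String × List (String × Int))) (nodes : List String) (out : List (String × List String)) : Prop := out = bipartite_projection_alt data nodes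
instance (data : List (String × List (String × Int))) (nodes : List String) (out : List (String × List String)) : Decidable (Spec_bipartite_projection data nodes out) := by unfold Spec_bipartite_projection; infer_instance

-- ===== CLAIM (what is proved, stated in full; the proofs are below) =====
def Claim_equal_bipartite_projection : Prop := ∀ (data : List (String × List (String × Int))) (nodes : List String), Dom_bipartite_projection data nodes → Pre_bipartite_projection data nodes → Spec_bipartite_projection data nodes (bipartite_projection data nodes)

-- ===== LEMMAS AND PROOFS =====

-- ---- generic Set machinery ----

theorem pv_contains_iff {α : Type} [BEq α] [LawfulBEq α] (s : List α) (x : α) :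
    s.contains x = true ↔ x ∈ s := by
  simp

theorem pv_scontains_iff {α : Type} [BEq α] [LawfulBEq α] (s : PySem.Set α) (x : α) :
    PySem.Set.contains s x = true ↔ x ∈ s := pv_contains_iff s x

theorem pv_update_congr {α : Type} [BEq α] [LawfulBEq α] (s : PySem.Set α) {t t' : List α}
    (h : PySem.Set.ofList t = PySem.Set.ofList t') : s.update t = s.update t' := by
  rw [PySem.Set.update_eq_append_filter, PySem.Set.update_eq_append_filter, h]

theorem pv_update_noop {α : Type} [BEq α] [LawfulBEq α] (s : PySem.Set α) {t : List α}
    (h : ∀ e ∈ t, e ∈ s) : s.update t = s := by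
  rw [PySem.Set.update_eq_append_filter]
  have hnil : List.filter (fun y => !s.contains y) (PySem.Set.ofList t) = [] := by
    apply List.filter_eq_nil_iff.mpr
    intro a ha
    have hmem := (PySem.Set.mem_ofList t a).mp ha
    simp
    exact h a hmem
  rw [hnil, List.append_nil]

theorem pv_foldl_add_cons {α : Type} [BEq α] [LawfulBEq α] (t : List α) (s : List α) (x : α)
    (hx : x ∉ t) : t.foldl PySem.Set.add (x :: s) = x :: t.foldl PySem.Set.add s := by
  induction t generalizing s with
  | nil => rfl
  | cons y t ih =>
    have hyx : y ≠ x := by intro h; exact hx (h ▸ List.mem_cons_self)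
    have hadd : PySem.Set.add (x :: s) y = x :: PySem.Set.add s y := by
      by_cases hmem : y ∈ s
      · simp [PySem.Set.add, hmem]
      · simp [PySem.Set.add, hmem, hyx]
    simp only [List.foldl_cons, hadd]
    exact ih _ (fun h => hx (List.mem_cons_of_mem _ h))

theorem pv_ofList_eq_nil_iff {α : Type} [BEq α] [LawfulBEq α] (l : List α) :
    PySem.Set.ofList l = [] ↔ l = [] := by
  constructor
  · intro h
    by_contra hne
    obtain ⟨x, hx⟩ := List.exists_mem_of_ne_nil _ hne
    have := (PySem.Set.mem_ofList l x).mpr hx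
    rw [h] at this
    exact absurd this (List.not_mem_nil)
  · intro h; subst h; rfl

theorem pv_filter_add {α : Type} [BEq α] [LawfulBEq α] (s : PySem.Set α) (x : α) (p : α → Bool) :
    List.filter p (PySem.Set.add s x)
      = if p x = true then PySem.Set.add (List.filter p s) x else List.filter p s := by
  by_cases hmem : x ∈ s
  · by_cases hp : p x = true
    · have hmf : x ∈ List.filter p s := List.mem_filter.mpr ⟨hmem, hp⟩
      simp [PySem.Set.add, hmem, hp, hmf]
    · simp [PySem.Set.add, hmem, hp]
  · by_cases hp : p x = true
    · have hmf : x ∉ List.filter p s := fun h => hmem (List.mem_filter.mp h).1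
      simp [PySem.Set.add, hmem, hp, hmf, List.filter_append]
    · simp [PySem.Set.add, hmem, hp, List.filter_append]

theorem pv_filter_update {α : Type} [BEq α] [LawfulBEq α] (s : PySem.Set α) (t : List α) (p : α → Bool) :
    List.filter p (s.update t) = PySem.Set.update (List.filter p s) (t.filter p) := by
  induction t generalizing s with
  | nil => simp [PySem.Set.update_nil]
  | cons x t ih =>
    rw [PySem.Set.update_cons, ih, List.filter_cons]
    by_cases hp : p x = true
    · rw [pv_filter_add]
      simp only [hp, if_pos]
      rw [PySem.Set.update_cons]
    · rw [pv_filter_add]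
      simp [hp]

theorem pv_ofList_filter {α : Type} [BEq α] [LawfulBEq α] (l : List α) (p : α → Bool) :
    PySem.Set.ofList (l.filter p) = (PySem.Set.ofList l).filter p := by
  have h1 : PySem.Set.ofList (l.filter p) = PySem.Set.empty.update (l.filter p) := by
    rw [PySem.Set.update_empty]
  have h2 : PySem.Set.ofList l = PySem.Set.empty.update l := by rw [PySem.Set.update_empty]
  rw [h1, h2, pv_filter_update]
  rfl

theorem pv_ofList_nodup_eq_self {α : Type} [BEq α] [LawfulBEq α] (l : List α) (h : l.Nodup) :
    PySem.Set.ofList l = l := by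
  induction l with
  | nil => rfl
  | cons x t ih =>
    have hxt : x ∉ t := (List.nodup_cons.mp h).1
    have : PySem.Set.ofList (x :: t) = t.foldl PySem.Set.add [x] := rfl
    rw [this]
    have : ([x] : List α) = x :: ([] : List α) := rfl
    rw [this, pv_foldl_add_cons t [] x hxt]
    rw [← PySem.Set.ofList_eq_foldl]
    rw [ih (List.nodup_cons.mp h).2]

-- update by a nonempty all-x list is a single add
theorem pv_update_const {α : Type} [BEq α] [LawfulBEq α] (s : PySem.Set α) (t : List α) (x : α)
    (hne : t ≠ []) (hall : ∀ e ∈ t, e = x) : s.update t = s.add x := by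
  cases t with
  | nil => exact absurd rfl hne
  | cons y t =>
    have hy : y = x := hall y List.mem_cons_self
    subst hy
    rw [PySem.Set.update_cons]
    apply pv_update_noop
    intro e he
    have : e = y := hall e (List.mem_cons_of_mem _ he)
    subst this
    simp [PySem.Set.mem_add]

-- ---- interleave [x,y1,x,y2,...] lemma ----

theorem pv_foldl_add_interleave {α : Type} [BEq α] [LawfulBEq α] (x : α) (t : List α) :
    ∀ s : PySem.Set α, x ∈ s →
      (t.flatMap (fun y => [x, y])).foldl PySem.Set.add s = t.foldl PySem.Set.add s := by
  induction t with
  | nil => intro s _; rfl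
  | cons y t ih =>
    intro s hx
    have hsx : PySem.Set.add s x = s := by
      simp [PySem.Set.add, hx]
    simp only [List.flatMap_cons, List.foldl_append, List.foldl_cons, List.foldl_nil, hsx,
      List.foldl_cons]
    exact ih (PySem.Set.add s y) ((PySem.Set.mem_add s y x).mpr (Or.inl hx))

theorem pv_ofList_interleave {α : Type} [BEq α] [LawfulBEq α] (x : α) (ys : List α) (hx : x ∉ ys) :
    PySem.Set.ofList (ys.flatMap (fun y => [x, y])) =
      if ys = [] then [] else x :: PySem.Set.ofList ys := by
  cases ys with
  | nil => rfl
  | cons y t =>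
    have hxy : x ≠ y := fun h => hx (h ▸ List.mem_cons_self)
    have hxt : x ∉ t := fun h => hx (List.mem_cons_of_mem _ h)
    simp only [reduceCtorEq, if_false]
    rw [PySem.Set.ofList_eq_foldl]
    simp only [List.flatMap_cons, List.foldl_append, List.foldl_cons, List.foldl_nil]
    have e1 : PySem.Set.add ([] : List α) x = [x] := rfl
    have e2 : PySem.Set.add ([x] : List α) y = [x, y] := by
      simp [PySem.Set.add, (Ne.symm hxy)]
    rw [e1, e2]
    rw [pv_foldl_add_interleave x t [x, y] (List.mem_cons_self)]
    have : ([x, y] : List α) = x :: [y] := rfl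
    rw [this, pv_foldl_add_cons t [y] x hxt]
    rw [PySem.Set.ofList_eq_foldl]
    rfl

-- ---- dedup of outer rows ----

-- update by flatMap only depends on per-row updates; rows already covered are no-ops
def pvDedupAux {α : Type} [DecidableEq α] : List α → List α → List α
  | _, [] => []
  | seen, x :: t => if x ∈ seen then pvDedupAux seen t else x :: pvDedupAux (x :: seen) t

theorem pv_dedupAux_congr {α : Type} [DecidableEq α] (l : List α) :
    ∀ (s s' : List α), (∀ a, a ∈ s ↔ a ∈ s') → pvDedupAux s l = pvDedupAux s' l := by
  induction l with
  | nil => intro s s' _; rfl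
  | cons x t ih =>
    intro s s' h
    simp only [pvDedupAux]
    by_cases hm : x ∈ s
    · rw [if_pos hm, if_pos ((h x).mp hm)]
      exact ih s s' h
    · rw [if_neg hm, if_neg (fun hc => hm ((h x).mpr hc))]
      congr 1
      apply ih
      intro a
      simp [h a]

theorem pv_foldl_add_eq_dedupAux {α : Type} [BEq α] [LawfulBEq α] [DecidableEq α] (l : List α) :
    ∀ s : List α, l.foldl PySem.Set.add s = s ++ pvDedupAux s l := by
  induction l with
  | nil => intro s; simp [pvDedupAux]
  | cons x t ih =>
    intro s
    simp only [List.foldl_cons, pvDedupAux]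
    by_cases hm : x ∈ s
    · have : PySem.Set.add s x = s := by
        simp [PySem.Set.add, hm]
      rw [this, if_pos hm, ih s]
    · have : PySem.Set.add s x = s ++ [x] := by
        simp [PySem.Set.add, hm]
      rw [this, if_neg hm, ih (s ++ [x])]
      rw [List.append_assoc, List.singleton_append]
      congr 2
      apply pv_dedupAux_congr
      intro a; simp [or_comm]

theorem pv_ofList_eq_dedupAux {α : Type} [BEq α] [LawfulBEq α] [DecidableEq α] (l : List α) :
    PySem.Set.ofList l = pvDedupAux [] l := by
  have := pv_foldl_add_eq_dedupAux l []
  simpa [PySem.Set.ofList_eq_foldl] using this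

theorem pv_update_flatMap_dedup {α : Type} [BEq α] [LawfulBEq α] [DecidableEq α]
    (f : α → List α) (l : List α) :
    ∀ (seen : List α) (s : PySem.Set α), (∀ x ∈ seen, ∀ e ∈ f x, e ∈ s) →
      s.update (l.flatMap f) = s.update ((pvDedupAux seen l).flatMap f) := by
  induction l with
  | nil => intro seen s _; rfl
  | cons x t ih =>
    intro seen s hinv
    simp only [List.flatMap_cons, pvDedupAux]
    by_cases hm : x ∈ seen
    · rw [if_pos hm, PySem.Set.update_append,
        pv_update_noop s (hinv x hm), ih seen s hinv]
    · rw [if_neg hm]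
      simp only [List.flatMap_cons]
      rw [PySem.Set.update_append, PySem.Set.update_append]
      apply ih (x :: seen) (s.update (f x))
      intro z hz e he
      rcases List.mem_cons.mp hz with h | h
      · subst h; exact (PySem.Set.mem_update s (f z) e).mpr (Or.inr he)
      · exact (PySem.Set.mem_update s (f x) e).mpr (Or.inl (hinv z h e he))

theorem pv_update_flatMap_congr {α : Type} [BEq α] [LawfulBEq α]
    {f g : α → List α} (m : List α)
    (h : ∀ x ∈ m, ∀ s : PySem.Set α, s.update (f x) = s.update (g x)) :
    ∀ s : PySem.Set α, s.update (m.flatMap f) = s.update (m.flatMap g) := by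
  induction m with
  | nil => intro s; rfl
  | cons x t ih =>
    intro s
    simp only [List.flatMap_cons]
    rw [PySem.Set.update_append, PySem.Set.update_append,
      h x List.mem_cons_self s]
    exact ih (fun z hz => h z (List.mem_cons_of_mem _ hz)) _

-- ---- the SEQ lemma: dedup of a row-structured neighbour sequence ----

theorem pv_update_blocks {α : Type} [BEq α] [LawfulBEq α] [DecidableEq α]
    (g : α → List α) (q : α → Bool) (k : α) (m : List α) (hm : k ∉ m)
    (hblk : ∀ x, x ≠ k → (∀ e ∈ g x, e = x) ∧ (g x = [] ↔ q x = false)) :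
    ∀ s : PySem.Set α, s.update (m.flatMap g) = s.update (m.filter q) := by
  induction m with
  | nil => intro s; rfl
  | cons x t ih =>
    intro s
    have hxk : x ≠ k := fun h => hm (h ▸ List.mem_cons_self)
    have hkt : k ∉ t := fun h => hm (List.mem_cons_of_mem _ h)
    obtain ⟨hall, hiff⟩ := hblk x hxk
    simp only [List.flatMap_cons, List.filter_cons]
    rw [PySem.Set.update_append]
    by_cases hq : q x = true
    · have hne : g x ≠ [] := by
        intro h; rw [hiff.mp h] at hq; exact Bool.false_ne_true hq
      rw [pv_update_const s (g x) x hne hall, hq, if_pos rfl, PySem.Set.update_cons]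
      exact ih hkt _
    · have hnil : g x = [] := by
        rw [hiff]; exact Bool.eq_false_iff.mpr hq
      rw [hnil, PySem.Set.update_nil]
      have : (q x = true) = False := by simp [hq]
      simp only [hq, Bool.false_eq_true, if_false]
      exact ih hkt s

theorem pv_first_split {α : Type} (l : List α) (k : α) (h : k ∈ l) :
    ∃ m₁ m₂, l = m₁ ++ k :: m₂ ∧ k ∉ m₁ := by
  induction l with
  | nil => cases h
  | cons x t ih =>
    by_cases hx : x = k
    · exact ⟨[], t, by simp [hx], List.not_mem_nil⟩
    · rcases List.mem_cons.mp h with h' | h'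
      · exact absurd h'.symm hx
      · obtain ⟨m₁, m₂, he, hk⟩ := ih h'
        exact ⟨x :: m₁, m₂, by simp [he], by
          intro hc
          rcases List.mem_cons.mp hc with hc | hc
          · exact hx hc.symm
          · exact hk hc⟩

theorem pv_seq {α : Type} [BEq α] [LawfulBEq α] [DecidableEq α]
    (l : List α) (k : α) (q : α → Bool) (g : α → List α)
    (hk : k ∈ l)
    (hblk : ∀ x, x ≠ k → (∀ e ∈ g x, e = x) ∧ (g x = [] ↔ q x = false))
    (hgk : g k = l.filter q) :
    PySem.Set.ofList (l.flatMap g) = (PySem.Set.ofList l).filter q := by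
  obtain ⟨m₁, m₂, hsplit, hnm⟩ := pv_first_split l k hk
  subst hsplit
  simp only [List.flatMap_append, List.flatMap_cons]
  rw [PySem.Set.ofList_append, PySem.Set.update_append]
  -- prefix blocks
  have S1 : PySem.Set.ofList (m₁.flatMap g) = List.filter q (PySem.Set.ofList m₁) := by
    rw [← PySem.Set.update_empty, pv_update_blocks g q k m₁ hnm hblk,
      PySem.Set.update_empty, pv_ofList_filter]
  rw [S1]
  -- the k-row
  have S2 : PySem.Set.update (List.filter q (PySem.Set.ofList m₁)) (g k)
      = List.filter q (PySem.Set.ofList (m₁ ++ k :: m₂)) := by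
    rw [hgk, List.filter_append, PySem.Set.update_append]
    rw [pv_update_noop (List.filter q (PySem.Set.ofList m₁))
      (by
        intro e he
        have := List.mem_filter.mp he
        exact List.mem_filter.mpr ⟨(PySem.Set.mem_ofList m₁ e).mpr this.1, this.2⟩)]
    rw [← pv_filter_update, ← PySem.Set.ofList_append]
  rw [S2]
  -- the suffix blocks are no-ops
  apply pv_update_noop
  intro e he
  rcases List.mem_flatMap.mp he with ⟨x, hx, hex⟩
  by_cases hxk : x = k
  · subst hxk
    rw [hgk] at hex
    have := List.mem_filter.mp hex
    exact List.mem_filter.mpr ⟨(PySem.Set.mem_ofList _ e).mpr this.1, this.2⟩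
  · obtain ⟨hall, hiff⟩ := hblk x hxk
    have hex' : e = x := hall e hex
    subst hex'
    have hq : q e = true := by
      by_contra hq
      have : g e = [] := hiff.mpr (Bool.eq_false_iff.mpr hq)
      rw [this] at hex; exact List.not_mem_nil hex
    refine List.mem_filter.mpr ⟨(PySem.Set.mem_ofList _ e).mpr ?_, hq⟩
    exact List.mem_append.mpr (Or.inr (List.mem_cons_of_mem _ hx))

-- ---- normal form of the shared projection-building step ----

def pvStep (proj : PySem.Dict String (PySem.Set String)) (x y : String) : PySem.Dict String (PySem.Set String) :=
  (proj.modify x PySem.Set.empty (fun s => s.add y)).modify y PySem.Set.empty (fun s => s.add x)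

def pvEnds (L : List (String × String)) : List String := L.flatMap (fun p => [p.1, p.2])

def pvNbr (k : String) (L : List (String × String)) : List String :=
  L.flatMap (fun p => (if p.1 = k then [p.2] else []) ++ (if p.2 = k then [p.1] else []))

theorem pv_nodup_add {α : Type} [BEq α] [LawfulBEq α] (s : PySem.Set α) (x : α)
    (h : s.Nodup) : (PySem.Set.add s x).Nodup := by
  by_cases hm : x ∈ s
  · simp [PySem.Set.add, hm, h]
  · simp only [PySem.Set.add]
    have hc : s.contains x = false := by
      rw [Bool.eq_false_iff]; intro hcc; exact hm ((pv_contains_iff s x).mp hcc)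
    rw [hc]
    simp only [Bool.false_eq_true, if_false]
    rw [List.nodup_append]
    exact ⟨h, List.nodup_singleton x, fun a ha b hb => by
      rw [List.mem_singleton.mp hb]; exact fun hax => hm (hax ▸ ha)⟩

theorem pv_nodup_update {α : Type} [BEq α] [LawfulBEq α] (t : List α) :
    ∀ s : PySem.Set α, s.Nodup → (s.update t).Nodup := by
  induction t with
  | nil => intro s h; simpa [PySem.Set.update_nil] using h
  | cons x t ih =>
    intro s h
    rw [PySem.Set.update_cons]
    exact ih _ (pv_nodup_add s x h)

theorem pv_keys_insert_eq_add (d : PySem.Dict String (PySem.Set String)) (k : String) (v : PySem.Set String) :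
    (d.insert k v).keys = PySem.Set.add d.keys k := by
  have hmem : d.keys.contains k = d.contains k := by
    by_cases hm : k ∈ d.keys
    · rw [(pv_contains_iff _ _).mpr hm, ((PySem.Dict.contains_iff_mem_keys d k).mpr hm)]
    · have h1 : d.keys.contains k = false := by
        rw [Bool.eq_false_iff]; intro h; exact hm ((pv_contains_iff _ _).mp h)
      have h2 : d.contains k = false := by
        rw [Bool.eq_false_iff]; intro h; exact hm ((PySem.Dict.contains_iff_mem_keys d k).mp h)
      rw [h1, h2]
    
  by_cases hc : d.contains k = true
  · rw [PySem.Dict.keys_insert_of_contains _ _ hc]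
    have hk : k ∈ d.keys := (PySem.Dict.contains_iff_mem_keys d k).mp hc
    simp [PySem.Set.add, hk]
  · have hcf : d.contains k = false := Bool.eq_false_iff.mpr hc
    rw [PySem.Dict.keys_insert_of_not_contains _ _ hcf]
    have hk : k ∉ d.keys := fun h =>
      absurd ((PySem.Dict.contains_iff_mem_keys d k).mpr h) hc
    simp [PySem.Set.add, hk]

theorem pv_keys_step (d : PySem.Dict String (PySem.Set String)) (x y : String) :
    (pvStep d x y).keys = PySem.Set.add (PySem.Set.add d.keys x) y := by
  unfold pvStep
  rw [PySem.Dict.keys_modify, pv_keys_insert_eq_add, PySem.Dict.keys_modify,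
    pv_keys_insert_eq_add]

theorem pv_keys_foldl_step (L : List (String × String)) :
    ∀ d : PySem.Dict String (PySem.Set String),
    (L.foldl (fun pr p => pvStep pr p.1 p.2) d).keys = PySem.Set.update d.keys (pvEnds L) := by
  induction L with
  | nil => intro d; simp [pvEnds, PySem.Set.update_nil]
  | cons p L ih =>
    intro d
    have he : pvEnds (p :: L) = p.1 :: p.2 :: pvEnds L := rfl
    rw [List.foldl_cons, ih, he, PySem.Set.update_cons, PySem.Set.update_cons, pv_keys_step]

theorem pv_nodup_keys_foldl_step (L : List (String × String)) (d : PySem.Dict String (PySem.Set String))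
    (h : d.keys.Nodup) : (L.foldl (fun pr p => pvStep pr p.1 p.2) d).keys.Nodup := by
  rw [pv_keys_foldl_step]
  exact pv_nodup_update _ _ h

theorem pv_getD_step (d : PySem.Dict String (PySem.Set String)) (x y k : String) (hxy : x ≠ y) :
    (pvStep d x y).getD k PySem.Set.empty
      = PySem.Set.update (d.getD k PySem.Set.empty)
          ((if x = k then [y] else []) ++ (if y = k then [x] else [])) := by
  unfold pvStep
  rw [PySem.Dict.getD_modify]
  by_cases hy : k = y
  · subst hy
    rw [if_pos rfl, PySem.Dict.getD_modify, if_neg (fun h : k = x => hxy h.symm)]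
    rw [if_neg (fun h : x = k => hxy h), if_pos rfl]
    rfl
  · rw [if_neg hy, PySem.Dict.getD_modify]
    by_cases hx : k = x
    · subst hx
      rw [if_pos rfl, if_pos rfl, if_neg (fun h : y = k => hy h.symm)]
      rfl
    · rw [if_neg hx, if_neg (fun h : x = k => hx h.symm), if_neg (fun h : y = k => hy h.symm)]
      rfl

theorem pv_getD_foldl_step (L : List (String × String)) :
    ∀ d : PySem.Dict String (PySem.Set String), ∀ k : String, (∀ p ∈ L, p.1 ≠ p.2) →
    (L.foldl (fun pr p => pvStep pr p.1 p.2) d).getD k PySem.Set.empty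
      = PySem.Set.update (d.getD k PySem.Set.empty) (pvNbr k L) := by
  induction L with
  | nil => intro d k _; simp [pvNbr, PySem.Set.update_nil]
  | cons p L ih =>
    intro d k hL
    have he : pvNbr k (p :: L)
        = ((if p.1 = k then [p.2] else []) ++ (if p.2 = k then [p.1] else [])) ++ pvNbr k L := rfl
    rw [List.foldl_cons, ih _ _ (fun q hq => hL q (List.mem_cons_of_mem _ hq)), he,
      PySem.Set.update_append, pv_getD_step d p.1 p.2 k (hL p List.mem_cons_self)]

theorem pv_items_foldl_step (L : List (String × String)) (hL : ∀ p ∈ L, p.1 ≠ p.2) :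
    (L.foldl (fun pr p => pvStep pr p.1 p.2) PySem.Dict.empty).items
      = (PySem.Set.ofList (pvEnds L)).map (fun k => (k, PySem.Set.ofList (pvNbr k L))) := by
  have hkeys : (L.foldl (fun pr p => pvStep pr p.1 p.2) PySem.Dict.empty).keys
      = PySem.Set.ofList (pvEnds L) := by
    rw [pv_keys_foldl_step]
    have : (PySem.Dict.empty : PySem.Dict String (PySem.Set String)).keys = PySem.Set.empty := rfl
    rw [this, PySem.Set.update_empty]
  have hnd : (L.foldl (fun pr p => pvStep pr p.1 p.2) PySem.Dict.empty).keys.Nodup :=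
    pv_nodup_keys_foldl_step L _ PySem.Dict.nodup_keys_empty
  rw [PySem.Dict.items_eq_map_keys _ hnd PySem.Set.empty, hkeys]
  apply List.map_congr_left
  intro k _
  rw [pv_getD_foldl_step L _ k hL]
  have : (PySem.Dict.empty : PySem.Dict String (PySem.Set String)).getD k PySem.Set.empty
      = PySem.Set.empty := rfl
  rw [this, PySem.Set.update_empty]

-- ---- A-side predicates and flattening ----

def pvKeySet (data : List (String × List (String × Int))) (u : String) : PySem.Set String :=
  PySem.Set.ofList (((PySem.Dict.mk data).getD u []).map Prod.fst)

def pvPA (data : List (String × List (String × Int))) (x y : String) : Bool :=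
  decide (x ≠ y) && decide (PySem.Set.inter (pvKeySet data x) (pvKeySet data y) ≠ [])

def pvLA (data : List (String × List (String × Int))) (nodes : List String) : List (String × String) :=
  nodes.flatMap (fun x => (nodes.filter (pvPA data x)).map (fun y => (x, y)))

theorem pv_A_eq_foldl_step (data : List (String × List (String × Int))) (nodes : List String) :
    bipartite_projection data nodes
      = ((pvLA data nodes).foldl (fun pr p => pvStep pr p.1 p.2) PySem.Dict.empty).items := by
  have h0 : bipartite_projection data nodes
      = (nodes.foldl (fun proj node1 =>
          nodes.foldl (fun proj node2 =>
            if node1 ≠ node2 then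
              (if PySem.Set.inter (pvKeySet data node1) (pvKeySet data node2) ≠ [] then
                pvStep proj node1 node2
              else proj)
            else proj) proj) PySem.Dict.empty).items := rfl
  rw [h0]
  unfold pvLA
  rw [List.foldl_flatMap]
  congr 1
  apply PySem.List.foldl_congr_mem
  intro acc x _
  rw [List.foldl_map, ← PySem.List.foldl_if_eq_foldl_filter (pvPA data x)
    (fun pr y => pvStep pr x y)]
  apply PySem.List.foldl_congr_mem
  intro pr y _
  by_cases h1 : x = y
  · subst h1
    simp [pvPA]
  · by_cases h2 : PySem.Set.inter (pvKeySet data x) (pvKeySet data y) ≠ []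
    · simp [pvPA, h1, h2]
    · simp [pvPA, h1, h2]

-- ---- B-side objects ----

def pvUsers (nodes : List String) : List String := PySem.List.dedup nodes

def pvPos (nodes : List String) : PySem.Dict String Int :=
  (PySem.List.enumerate (pvUsers nodes)).foldl (fun d p => d.insert p.2 p.1) PySem.Dict.empty

def pvIndex (data : List (String × List (String × Int))) (nodes : List String) : PySem.Dict String (List String) :=
  data.foldl (fun idx p =>
    if (pvPos nodes).contains p.1 then
      p.2.foldl (fun idx aq => idx.modify aq.1 [] (fun l => l ++ [p.1])) idx
    else idx) PySem.Dict.empty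

def pvNbrs (data : List (String × List (String × Int))) (nodes : List String) : PySem.Dict String (PySem.Set String) :=
  (pvIndex data nodes).values.foldl (fun nb us =>
    us.foldl (fun nb u => nb.modify u PySem.Set.empty (fun s => s.update us)) nb) PySem.Dict.empty

def pvPB (data : List (String × List (String × Int))) (nodes : List String) (u v : String) : Bool :=
  decide (v ≠ u) && ((pvNbrs data nodes).getD u PySem.Set.empty).contains v

def pvLB (data : List (String × List (String × Int))) (nodes : List String) : List (String × String) :=
  (pvUsers nodes).flatMap (fun u => ((pvUsers nodes).filter (fun v => pvPB data nodes u v)).map (fun v => (u, v)))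

-- ---- users / pos characterization ----

theorem pv_users_nodup (nodes : List String) : (pvUsers nodes).Nodup :=
  PySem.Set.nodup_ofList nodes

theorem pv_mem_users (nodes : List String) (u : String) : u ∈ pvUsers nodes ↔ u ∈ nodes :=
  PySem.Set.mem_ofList nodes u

theorem pv_enumerate_map_snd (l : List String) :
    ∀ st : Int, (PySem.List.enumerate l st).map (fun p => p.2) = l := by
  induction l with
  | nil => intro st; simp [PySem.List.enumerate]
  | cons x t ih => intro st; simp [PySem.List.enumerate, ih]

theorem pv_mem_enumerate (l : List String) :
    ∀ (st : Int) (i : Nat) (hi : i < l.length), ((st + i : Int), l[i]) ∈ PySem.List.enumerate l st := by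
  induction l with
  | nil => intro st i hi; simp at hi
  | cons x t ih =>
    intro st i hi
    cases i with
    | zero => simp [PySem.List.enumerate]
    | succ j =>
      have := ih (st + 1) j (by simpa using hi)
      have harith : (st + (j + 1 : Nat) : Int) = st + 1 + (j : Int) := by push_cast; ring
      simp only [PySem.List.enumerate, List.mem_cons]
      right
      rw [harith]
      simpa using this

theorem pv_pos_items (nodes : List String) :
    (pvPos nodes).items = (PySem.List.enumerate (pvUsers nodes)).map (fun p => (p.2, p.1)) := by
  unfold pvPos
  rw [PySem.Dict.items_foldl_insert_fresh (PySem.List.enumerate (pvUsers nodes))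
    (fun p => p.2) (fun p => p.1) PySem.Dict.empty
    (fun a _ => PySem.Dict.contains_empty a.2)
    (by rw [pv_enumerate_map_snd]; exact pv_users_nodup nodes)]
  rfl

theorem pv_pos_keys (nodes : List String) : (pvPos nodes).keys = pvUsers nodes := by
  have : (pvPos nodes).keys = (pvPos nodes).items.map (fun p => p.1) := rfl
  rw [this, pv_pos_items, List.map_map]
  have : ((fun p => p.1) ∘ (fun (p : Int × String) => (p.2, p.1))) = (fun p => p.2) := rfl
  rw [this, pv_enumerate_map_snd]

theorem pv_pos_contains (nodes : List String) (v : String) :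
    (pvPos nodes).contains v = true ↔ v ∈ pvUsers nodes := by
  rw [PySem.Dict.contains_iff_mem_keys, pv_pos_keys]

theorem pv_pos_getD (nodes : List String) (i : Nat) (hi : i < (pvUsers nodes).length) :
    (pvPos nodes).getD (pvUsers nodes)[i] 0 = (i : Int) := by
  have hnd : (pvPos nodes).keys.Nodup := by
    rw [pv_pos_keys]; exact pv_users_nodup nodes
  have hitem : ((pvUsers nodes)[i], (i : Int)) ∈ (pvPos nodes).items := by
    rw [pv_pos_items]
    have := pv_mem_enumerate (pvUsers nodes) 0 i hi
    rw [show ((0 : Int) + i) = (i : Int) by ring] at this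
    exact List.mem_map.mpr ⟨((i : Int), (pvUsers nodes)[i]), this, rfl⟩
  have := PySem.Dict.get?_of_mem_items (pvPos nodes) hitem hnd
  simp [PySem.Dict.getD, this]

theorem pv_users_pairwise_pos (nodes : List String) :
    (pvUsers nodes).Pairwise (fun a b => (pvPos nodes).getD a 0 < (pvPos nodes).getD b 0) := by
  rw [List.pairwise_iff_getElem]
  intro i j hi hj hij
  rw [pv_pos_getD nodes i hi, pv_pos_getD nodes j hj]
  exact_mod_cast hij

-- ---- index characterization ----

theorem pv_index_inner_getD (u : String) (arts : List (String × Int))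
    (idx : PySem.Dict String (List String)) (a : String) :
    (arts.foldl (fun idx aq => idx.modify aq.1 [] (fun l => l ++ [u])) idx).getD a []
      = idx.getD a [] ++ ((arts.map (fun aq => (aq.1, u))).filter (fun p => p.1 == a)).map (fun p => p.2) := by
  have h : arts.foldl (fun idx aq => idx.modify aq.1 [] (fun l => l ++ [u])) idx
      = (arts.map (fun aq => (aq.1, u))).foldl (fun d p => d.modify p.1 [] (fun l => l ++ [p.2])) idx := by
    rw [List.foldl_map]
  rw [h, PySem.Dict.getD_foldl_modify_append]

theorem pv_index_fold_mem (nodes : List String) (entries : List (String × List (String × Int))) :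
    ∀ (idx : PySem.Dict String (List String)) (a v : String),
    v ∈ ((entries.foldl (fun idx p =>
        if (pvPos nodes).contains p.1 then
          p.2.foldl (fun idx aq => idx.modify aq.1 [] (fun l => l ++ [p.1])) idx
        else idx) idx).getD a [])
      ↔ v ∈ idx.getD a [] ∨ ∃ arts, (v, arts) ∈ entries ∧ (pvPos nodes).contains v = true
          ∧ a ∈ arts.map Prod.fst := by
  induction entries with
  | nil => intro idx a v; simp
  | cons p t ih =>
    intro idx a v
    rw [List.foldl_cons]
    by_cases hc : (pvPos nodes).contains p.1 = true
    · rw [if_pos hc, ih]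
      rw [pv_index_inner_getD]
      constructor
      · rintro (h | h)
        · rcases List.mem_append.mp h with h' | h'
          · exact Or.inl h'
          · rcases List.mem_map.mp h' with ⟨q, hq, hqv⟩
            have hq' := List.mem_filter.mp hq
            rcases List.mem_map.mp hq'.1 with ⟨aq, haq, haqe⟩
            have hv : v = p.1 := by rw [← hqv, ← haqe]
            have ha : q.1 = a := by simpa using hq'.2
            refine Or.inr ⟨p.2, ?_, ?_, ?_⟩
            · rw [hv]; exact List.mem_cons_self
            · rw [hv]; exact hc
            · rw [← ha, ← haqe]
              exact List.mem_map.mpr ⟨aq, haq, rfl⟩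
        · rcases h with ⟨arts, hmem, hvc, hka⟩
          exact Or.inr ⟨arts, List.mem_cons_of_mem _ hmem, hvc, hka⟩
      · rintro (h | h)
        · exact Or.inl (List.mem_append.mpr (Or.inl h))
        · rcases h with ⟨arts, hmem, hvc, hka⟩
          rcases List.mem_cons.mp hmem with h' | h'
          · left
            apply List.mem_append.mpr
            right
            have hv : v = p.1 := congrArg Prod.fst h'
            have harts : arts = p.2 := congrArg Prod.snd h'
            rcases List.mem_map.mp (harts ▸ hka) with ⟨aq, haq, haqa⟩
            refine List.mem_map.mpr ⟨(aq.1, p.1), ?_, by rw [hv]⟩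
            refine List.mem_filter.mpr ⟨List.mem_map.mpr ⟨aq, haq, rfl⟩, by simp [haqa]⟩
          · exact Or.inr ⟨arts, h', hvc, hka⟩
    · rw [if_neg hc, ih]
      constructor
      · rintro (h | h)
        · exact Or.inl h
        · rcases h with ⟨arts, hmem, hvc, hka⟩
          exact Or.inr ⟨arts, List.mem_cons_of_mem _ hmem, hvc, hka⟩
      · rintro (h | h)
        · exact Or.inl h
        · rcases h with ⟨arts, hmem, hvc, hka⟩
          rcases List.mem_cons.mp hmem with h' | h'
          · exfalso
            have hv : v = p.1 := congrArg Prod.fst h'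
            rw [← hv] at hc
            exact hc hvc
          · exact Or.inr ⟨arts, h', hvc, hka⟩

def pvKeysRaw (data : List (String × List (String × Int))) (u : String) : List String :=
  ((PySem.Dict.mk data).getD u []).map Prod.fst

theorem pv_mem_index (data : List (String × List (String × Int))) (nodes : List String)
    (hnd : (data.map Prod.fst).Nodup) (a v : String) :
    v ∈ (pvIndex data nodes).getD a []
      ↔ (pvPos nodes).contains v = true ∧ a ∈ pvKeysRaw data v := by
  unfold pvIndex
  rw [pv_index_fold_mem]
  have hkeys : (PySem.Dict.mk data).keys.Nodup := by
    simpa [PySem.Dict.keys_mk] using hnd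
  constructor
  · rintro (h | ⟨arts, hmem, hvc, hka⟩)
    · simp [PySem.Dict.getD_empty] at h
    · have : (PySem.Dict.mk data).get? v = some arts :=
        PySem.Dict.get?_of_mem_items _ hmem hkeys
      refine ⟨hvc, ?_⟩
      unfold pvKeysRaw
      rw [show (PySem.Dict.mk data).getD v [] = arts by simp [PySem.Dict.getD, this]]
      exact hka
  · rintro ⟨hvc, hka⟩
    right
    unfold pvKeysRaw at hka
    cases hget : (PySem.Dict.mk data).get? v with
    | none =>
      rw [show (PySem.Dict.mk data).getD v [] = [] by simp [PySem.Dict.getD, hget]] at hka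
      simp at hka
    | some arts =>
      refine ⟨arts, PySem.Dict.mem_items_of_get?_eq_some _ hget, hvc, ?_⟩
      rw [show (PySem.Dict.mk data).getD v [] = arts by simp [PySem.Dict.getD, hget]] at hka
      exact hka

theorem pv_index_keys_nodup (data : List (String × List (String × Int))) (nodes : List String) :
    (pvIndex data nodes).keys.Nodup := by
  unfold pvIndex
  generalize hstart : (PySem.Dict.empty : PySem.Dict String (List String)) = d0
  have h0 : d0.keys.Nodup := by rw [← hstart]; exact PySem.Dict.nodup_keys_empty
  clear hstart
  induction data generalizing d0 with
  | nil => exact h0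
  | cons p t ih =>
    rw [List.foldl_cons]
    apply ih
    by_cases hc : (pvPos nodes).contains p.1 = true
    · rw [if_pos hc]
      exact PySem.Dict.nodup_keys_foldl_modify_key p.2 (fun aq => aq.1) []
        (fun _ _ l => l ++ [p.1]) d0 h0
    · rw [if_neg hc]; exact h0

-- ---- nbrs characterization ----

theorem pv_nbrs_inner (us : List String) :
    ∀ (scan : List String) (nb : PySem.Dict String (PySem.Set String)) (u v : String),
    v ∈ ((scan.foldl (fun nb w => nb.modify w PySem.Set.empty (fun s => s.update us)) nb).getD u PySem.Set.empty)
      ↔ v ∈ nb.getD u PySem.Set.empty ∨ (u ∈ scan ∧ v ∈ us) := by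
  intro scan
  induction scan with
  | nil => intro nb u v; simp
  | cons w t ih =>
    intro nb u v
    rw [List.foldl_cons, ih]
    rw [PySem.Dict.getD_modify]
    by_cases hw : u = w
    · subst hw
      rw [if_pos rfl]
      rw [show ∀ s : PySem.Set String, (v ∈ s.update us ↔ v ∈ s ∨ v ∈ us) from
        fun s => PySem.Set.mem_update s us v]
      constructor
      · rintro ((h | h) | h)
        · exact Or.inl h
        · exact Or.inr ⟨List.mem_cons_self, h⟩
        · exact Or.inr ⟨List.mem_cons_self, h.2⟩
      · rintro (h | h)
        · exact Or.inl (Or.inl h)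
        · exact Or.inl (Or.inr h.2)
    · rw [if_neg hw]
      constructor
      · rintro (h | h)
        · exact Or.inl h
        · exact Or.inr ⟨List.mem_cons_of_mem _ h.1, h.2⟩
      · rintro (h | h)
        · exact Or.inl h
        · rcases List.mem_cons.mp h.1 with h' | h'
          · exact absurd h' hw
          · exact Or.inr ⟨h', h.2⟩

theorem pv_nbrs_fold_mem (vals : List (List String)) :
    ∀ (nb : PySem.Dict String (PySem.Set String)) (u v : String),
    v ∈ ((vals.foldl (fun nb us =>
        us.foldl (fun nb w => nb.modify w PySem.Set.empty (fun s => s.update us)) nb) nb).getD u PySem.Set.empty)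
      ↔ v ∈ nb.getD u PySem.Set.empty ∨ ∃ us ∈ vals, u ∈ us ∧ v ∈ us := by
  induction vals with
  | nil => intro nb u v; simp
  | cons us t ih =>
    intro nb u v
    rw [List.foldl_cons, ih, pv_nbrs_inner]
    simp only [List.mem_cons]
    constructor
    · rintro ((h | h) | ⟨us', hus', hm⟩)
      exacts [Or.inl h, Or.inr ⟨us, Or.inl rfl, h⟩, Or.inr ⟨us', Or.inr hus', hm⟩]
    · rintro (h | ⟨us', h' | h', hm⟩)
      exacts [Or.inl (Or.inl h), Or.inl (Or.inr (h' ▸ hm)), Or.inr ⟨us', h', hm⟩]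

theorem pv_mem_nbrs (data : List (String × List (String × Int))) (nodes : List String) (u v : String) :
    v ∈ (pvNbrs data nodes).getD u PySem.Set.empty
      ↔ ∃ us ∈ (pvIndex data nodes).values, u ∈ us ∧ v ∈ us := by
  unfold pvNbrs
  rw [pv_nbrs_fold_mem]
  simp [PySem.Dict.getD_empty]

theorem pv_nbrs_inner_nodup (us : List String) :
    ∀ (scan : List String) (nb : PySem.Dict String (PySem.Set String)),
    (∀ w, (nb.getD w PySem.Set.empty).Nodup) → ∀ w,
    ((scan.foldl (fun nb x => nb.modify x PySem.Set.empty (fun s => s.update us)) nb).getD w PySem.Set.empty).Nodup := by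
  intro scan
  induction scan with
  | nil => intro nb h0 w; exact h0 w
  | cons x t ih =>
    intro nb h0 w
    rw [List.foldl_cons]
    apply ih
    intro w'
    rw [PySem.Dict.getD_modify]
    by_cases hw : w' = x
    · rw [if_pos hw]; exact pv_nodup_update _ _ (h0 x)
    · rw [if_neg hw]; exact h0 w'

theorem pv_nbrs_getD_nodup (data : List (String × List (String × Int))) (nodes : List String) (u : String) :
    ((pvNbrs data nodes).getD u PySem.Set.empty).Nodup := by
  unfold pvNbrs
  have main : ∀ (vals : List (List String)) (nb : PySem.Dict String (PySem.Set String)),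
      (∀ w, (nb.getD w PySem.Set.empty).Nodup) → ∀ w,
      ((vals.foldl (fun nb us =>
        us.foldl (fun nb w => nb.modify w PySem.Set.empty (fun s => s.update us)) nb) nb).getD w PySem.Set.empty).Nodup := by
    intro vals
    induction vals with
    | nil => intro nb h0 w; exact h0 w
    | cons us t ih =>
      intro nb h0 w
      rw [List.foldl_cons]
      exact ih _ (pv_nbrs_inner_nodup us us nb h0) w
  exact main _ PySem.Dict.empty (fun w => by simp [PySem.Dict.getD_empty]) u

theorem pv_shared (data : List (String × List (String × Int))) (nodes : List String) (u v : String) :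
    v ∈ (pvNbrs data nodes).getD u PySem.Set.empty
      ↔ ∃ a, u ∈ (pvIndex data nodes).getD a [] ∧ v ∈ (pvIndex data nodes).getD a [] := by
  rw [pv_mem_nbrs]
  constructor
  · rintro ⟨us, hus, hu, hv⟩
    rcases List.mem_map.mp hus with ⟨pr, hitem, he⟩
    have hitem' : (pr.1, pr.2) ∈ (pvIndex data nodes).items := by simpa using hitem
    have hget : (pvIndex data nodes).get? pr.1 = some pr.2 :=
      PySem.Dict.get?_of_mem_items _ hitem' (pv_index_keys_nodup data nodes)
    have hgd : (pvIndex data nodes).getD pr.1 [] = us := by simp [PySem.Dict.getD, hget, he]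
    exact ⟨pr.1, hgd ▸ hu, hgd ▸ hv⟩
  · rintro ⟨a, hu, hv⟩
    cases hget : (pvIndex data nodes).get? a with
    | none =>
      rw [show (pvIndex data nodes).getD a [] = [] by simp [PySem.Dict.getD, hget]] at hu
      simp at hu
    | some us =>
      have he : (pvIndex data nodes).getD a [] = us := by simp [PySem.Dict.getD, hget]
      rw [he] at hu hv
      refine ⟨us, ?_, hu, hv⟩
      exact List.mem_map.mpr ⟨(a, us), PySem.Dict.mem_items_of_get?_eq_some _ hget, rfl⟩

theorem pv_nbrs_mem_users' (data : List (String × List (String × Int))) (nodes : List String)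
    (u v : String) (h : v ∈ (pvNbrs data nodes).getD u PySem.Set.empty) : v ∈ pvUsers nodes := by
  rcases (pv_shared data nodes u v).mp h with ⟨a, _, hv⟩
  have : (pvPos nodes).contains v = true := by
    unfold pvIndex at hv
    rcases (pv_index_fold_mem nodes data PySem.Dict.empty a v).mp hv with h' | ⟨_, _, hc, _⟩
    · simp [PySem.Dict.getD_empty] at h'
    · exact hc
  exact (pv_pos_contains nodes v).mp this

theorem pv_sorted_row (data : List (String × List (String × Int))) (nodes : List String) (u : String) :
    PySem.List.sorted (PySem.Set.diff ((pvNbrs data nodes).getD u PySem.Set.empty) [u])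
        (fun v => (pvPos nodes).getD v 0)
      = (pvUsers nodes).filter (fun v => pvPB data nodes u v) := by
  apply PySem.List.sorted_eq_of_perm_of_pairwise_lt
  · apply (List.perm_ext_iff_of_nodup
      (List.Nodup.filter _ (pv_users_nodup nodes))
      (List.Nodup.filter _ (pv_nbrs_getD_nodup data nodes u))).mpr
    intro a
    simp only [List.mem_filter, pvPB, Bool.and_eq_true, decide_eq_true_eq]
    constructor
    · rintro ⟨_, hne, hc⟩
      have hm : a ∈ (pvNbrs data nodes).getD u PySem.Set.empty := (pv_contains_iff _ _).mp hc
      refine ⟨hm, ?_⟩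
      simp [hne]
    · rintro ⟨hm, hnc⟩
      have hne : a ≠ u := by
        intro h; subst h
        simp at hnc
      exact ⟨pv_nbrs_mem_users' data nodes u a hm, hne, (pv_contains_iff _ _).mpr hm⟩
  · exact List.Pairwise.sublist List.filter_sublist (pv_users_pairwise_pos nodes)

theorem pv_B_eq_foldl_step (data : List (String × List (String × Int))) (nodes : List String) :
    bipartite_projection_alt data nodes
      = ((pvLB data nodes).foldl (fun pr p => pvStep pr p.1 p.2) PySem.Dict.empty).items := by
  have h0 : bipartite_projection_alt data nodes
      = ((pvUsers nodes).foldl (fun proj u =>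
          (PySem.List.sorted (PySem.Set.diff ((pvNbrs data nodes).getD u PySem.Set.empty) [u])
              (fun v => (pvPos nodes).getD v 0)).foldl
            (fun proj v => pvStep proj u v) proj) PySem.Dict.empty).items := rfl
  rw [h0]
  unfold pvLB
  rw [List.foldl_flatMap]
  congr 1
  apply PySem.List.foldl_congr_mem
  intro acc u _
  rw [List.foldl_map, pv_sorted_row data nodes u]

-- ---- adjacency agreement between the two predicates on users ----

theorem pv_mem_inter {α : Type} [BEq α] [LawfulBEq α] (s t : PySem.Set α) (a : α) :
    a ∈ PySem.Set.inter s t ↔ a ∈ s ∧ a ∈ t := by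
  simp [PySem.Set.inter, List.mem_filter]

theorem pv_inter_ne_nil_comm (s t : PySem.Set String) :
    (PySem.Set.inter s t ≠ []) ↔ (PySem.Set.inter t s ≠ []) := by
  apply not_congr
  rw [List.eq_nil_iff_forall_not_mem, List.eq_nil_iff_forall_not_mem]
  constructor <;> intro h a ha <;>
    exact h a ((pv_mem_inter _ _ a).mpr (And.comm.mp ((pv_mem_inter _ _ a).mp ha)))

theorem pv_PA_symm (data : List (String × List (String × Int))) (x y : String) :
    pvPA data x y = pvPA data y x := by
  unfold pvPA
  rw [decide_eq_decide.mpr (ne_comm (a := x) (b := y)),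
    decide_eq_decide.mpr (pv_inter_ne_nil_comm (pvKeySet data x) (pvKeySet data y))]

theorem pv_PA_irrefl (data : List (String × List (String × Int))) (x : String) :
    pvPA data x x = false := by
  simp [pvPA]

theorem pv_PB_irrefl (data : List (String × List (String × Int))) (nodes : List String) (x : String) :
    pvPB data nodes x x = false := by
  simp [pvPB]

theorem pv_PB_symm (data : List (String × List (String × Int))) (nodes : List String) (u v : String) :
    pvPB data nodes u v = pvPB data nodes v u := by
  unfold pvPB
  rw [decide_eq_decide.mpr (ne_comm (a := v) (b := u))]
  congr 1
  have hiff : v ∈ (pvNbrs data nodes).getD u PySem.Set.empty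
      ↔ u ∈ (pvNbrs data nodes).getD v PySem.Set.empty := by
    rw [pv_shared, pv_shared]
    constructor <;> rintro ⟨a, h1, h2⟩ <;> exact ⟨a, h2, h1⟩
  by_cases hb : v ∈ (pvNbrs data nodes).getD u PySem.Set.empty
  · rw [(pv_scontains_iff _ _).mpr hb, (pv_scontains_iff _ _).mpr (hiff.mp hb)]
  · have h1 : PySem.Set.contains ((pvNbrs data nodes).getD u PySem.Set.empty) v = false := by
      rw [Bool.eq_false_iff]; exact fun h => hb ((pv_scontains_iff _ _).mp h)
    have h2 : PySem.Set.contains ((pvNbrs data nodes).getD v PySem.Set.empty) u = false := by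
      rw [Bool.eq_false_iff]; exact fun h => hb (hiff.mpr ((pv_scontains_iff _ _).mp h))
    rw [h1, h2]

theorem pv_PA_eq_PB (data : List (String × List (String × Int))) (nodes : List String)
    (hnd : (data.map Prod.fst).Nodup) (u v : String)
    (hu : u ∈ pvUsers nodes) (hv : v ∈ pvUsers nodes) :
    pvPA data u v = pvPB data nodes u v := by
  unfold pvPA pvPB
  rw [decide_eq_decide.mpr (ne_comm (a := u) (b := v))]
  congr 1
  have hiff : (PySem.Set.inter (pvKeySet data u) (pvKeySet data v) ≠ [])
      ↔ v ∈ (pvNbrs data nodes).getD u PySem.Set.empty := by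
    rw [pv_shared]
    constructor
    · intro hne
      obtain ⟨a, ha⟩ := List.exists_mem_of_ne_nil _ hne
      have hm := (pv_mem_inter _ _ a).mp ha
      refine ⟨a, ?_, ?_⟩
      · exact (pv_mem_index data nodes hnd a u).mpr
          ⟨(pv_pos_contains nodes u).mpr hu, (PySem.Set.mem_ofList _ _).mp hm.1⟩
      · exact (pv_mem_index data nodes hnd a v).mpr
          ⟨(pv_pos_contains nodes v).mpr hv, (PySem.Set.mem_ofList _ _).mp hm.2⟩
    · rintro ⟨a, hau, hav⟩
      have h1 := ((pv_mem_index data nodes hnd a u).mp hau).2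
      have h2 := ((pv_mem_index data nodes hnd a v).mp hav).2
      apply List.ne_nil_of_mem (a := a)
      exact (pv_mem_inter _ _ a).mpr
        ⟨(PySem.Set.mem_ofList _ _).mpr h1, (PySem.Set.mem_ofList _ _).mpr h2⟩
  by_cases hb : v ∈ (pvNbrs data nodes).getD u PySem.Set.empty
  · rw [(pv_scontains_iff _ _).mpr hb]
    exact decide_eq_true (hiff.mpr hb)
  · have h1 : PySem.Set.contains ((pvNbrs data nodes).getD u PySem.Set.empty) v = false := by
      rw [Bool.eq_false_iff]; exact fun h => hb ((pv_scontains_iff _ _).mp h)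
    rw [h1, decide_eq_false]
    exact fun h => hb (hiff.mp h)

theorem pv_users_eq (nodes : List String) : pvUsers nodes = PySem.Set.ofList nodes := rfl

theorem pv_ends_LA (data : List (String × List (String × Int))) (nodes : List String) :
    pvEnds (pvLA data nodes)
      = nodes.flatMap (fun x => (nodes.filter (pvPA data x)).flatMap (fun y => [x, y])) := by
  simp only [pvEnds, pvLA, List.flatMap_assoc, List.flatMap_map]

theorem pv_ends_LB (data : List (String × List (String × Int))) (nodes : List String) :
    pvEnds (pvLB data nodes)
      = (pvUsers nodes).flatMap (fun x =>
          ((pvUsers nodes).filter (fun v => pvPB data nodes x v)).flatMap (fun y => [x, y])) := by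
  simp only [pvEnds, pvLB, List.flatMap_assoc, List.flatMap_map]

theorem pv_nbr_LA (data : List (String × List (String × Int))) (nodes : List String) (k : String) :
    pvNbr k (pvLA data nodes)
      = nodes.flatMap (fun x => (nodes.filter (pvPA data x)).flatMap
          (fun y => (if x = k then [y] else []) ++ (if y = k then [x] else []))) := by
  simp only [pvNbr, pvLA, List.flatMap_assoc, List.flatMap_map]

theorem pv_nbr_LB (data : List (String × List (String × Int))) (nodes : List String) (k : String) :
    pvNbr k (pvLB data nodes)
      = (pvUsers nodes).flatMap (fun x => ((pvUsers nodes).filter (fun v => pvPB data nodes x v)).flatMap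
          (fun y => (if x = k then [y] else []) ++ (if y = k then [x] else []))) := by
  simp only [pvNbr, pvLB, List.flatMap_assoc, List.flatMap_map]

theorem pv_hLA (data : List (String × List (String × Int))) (nodes : List String) :
    ∀ p ∈ pvLA data nodes, p.1 ≠ p.2 := by
  intro p hp
  rcases List.mem_flatMap.mp hp with ⟨x, _, hp2⟩
  rcases List.mem_map.mp hp2 with ⟨y, hy, he⟩
  have := (List.mem_filter.mp hy).2
  rw [pvPA, Bool.and_eq_true, decide_eq_true_eq] at this
  rw [← he]
  exact this.1

theorem pv_hLB (data : List (String × List (String × Int))) (nodes : List String) :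
    ∀ p ∈ pvLB data nodes, p.1 ≠ p.2 := by
  intro p hp
  rcases List.mem_flatMap.mp hp with ⟨x, _, hp2⟩
  rcases List.mem_map.mp hp2 with ⟨y, hy, he⟩
  have := (List.mem_filter.mp hy).2
  rw [pvPB, Bool.and_eq_true, decide_eq_true_eq] at this
  rw [← he]
  exact fun h => this.1 h.symm

-- the per-row neighbour lists of A and B dedup to the same set
theorem pv_row_filter_eq (data : List (String × List (String × Int))) (nodes : List String)
    (hnd : (data.map Prod.fst).Nodup) (x : String) (hx : x ∈ pvUsers nodes) :
    PySem.Set.ofList (nodes.filter (pvPA data x))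
      = (pvUsers nodes).filter (fun v => pvPB data nodes x v) := by
  rw [pv_ofList_filter, ← pv_users_eq]
  exact List.filter_congr (fun v hv => pv_PA_eq_PB data nodes hnd x v hx hv)

theorem pv_keyseq (data : List (String × List (String × Int))) (nodes : List String)
    (hnd : (data.map Prod.fst).Nodup) :
    PySem.Set.ofList (pvEnds (pvLA data nodes)) = PySem.Set.ofList (pvEnds (pvLB data nodes)) := by
  rw [pv_ends_LA, pv_ends_LB, ← PySem.Set.update_empty, ← PySem.Set.update_empty]
  rw [pv_update_flatMap_dedup (fun x => (nodes.filter (pvPA data x)).flatMap (fun y => [x, y]))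
    nodes [] PySem.Set.empty (by intro x hx; cases hx)]
  rw [← pv_ofList_eq_dedupAux, ← pv_users_eq]
  apply pv_update_flatMap_congr
  intro x hx s
  apply pv_update_congr
  have hxA : x ∉ nodes.filter (pvPA data x) := by
    intro h
    have := (List.mem_filter.mp h).2
    rw [pv_PA_irrefl] at this
    exact Bool.false_ne_true this
  have hxB : x ∉ (pvUsers nodes).filter (fun v => pvPB data nodes x v) := by
    intro h
    have := (List.mem_filter.mp h).2
    rw [pv_PB_irrefl] at this
    exact Bool.false_ne_true this
  rw [pv_ofList_interleave x _ hxA, pv_ofList_interleave x _ hxB]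
  by_cases hA : nodes.filter (pvPA data x) = []
  · have hB : (pvUsers nodes).filter (fun v => pvPB data nodes x v) = [] := by
      rw [← pv_row_filter_eq data nodes hnd x hx, hA]
      rfl
    rw [if_pos hA, if_pos hB]
  · have hB : (pvUsers nodes).filter (fun v => pvPB data nodes x v) ≠ [] := by
      intro h
      apply hA
      apply (pv_ofList_eq_nil_iff _).mp
      rw [pv_row_filter_eq data nodes hnd x hx, h]
    rw [if_neg hA, if_neg hB, pv_row_filter_eq data nodes hnd x hx]
    congr 1
    exact (pv_ofList_nodup_eq_self _ (List.Nodup.filter _ (pv_users_nodup nodes))).symm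

-- the SEQ lemma instantiated for each side
theorem pv_nbrseq_A (data : List (String × List (String × Int))) (nodes : List String)
    (k : String) (hk : k ∈ nodes) :
    PySem.Set.ofList (pvNbr k (pvLA data nodes))
      = (PySem.Set.ofList nodes).filter (fun x => pvPA data x k) := by
  rw [pv_nbr_LA]
  apply pv_seq nodes k (fun x => pvPA data x k)
  · exact hk
  · intro x hxk
    constructor
    · intro e he
      rcases List.mem_flatMap.mp he with ⟨y, _, he2⟩
      rcases List.mem_append.mp he2 with h | h
      · rw [if_neg hxk] at h; cases h
      · by_cases hyk : y = k
        · rw [if_pos hyk] at h; exact List.mem_singleton.mp h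
        · rw [if_neg hyk] at h; cases h
    · constructor
      · intro hnil
        cases hq' : pvPA data x k with
        | false => rfl
        | true =>
          have hkmem : k ∈ nodes.filter (pvPA data x) := List.mem_filter.mpr ⟨hk, hq'⟩
          have hmem : x ∈ (nodes.filter (pvPA data x)).flatMap
              (fun y => (if x = k then [y] else []) ++ (if y = k then [x] else [])) :=
            List.mem_flatMap.mpr ⟨k, hkmem, List.mem_append.mpr (Or.inr (by
              rw [if_pos rfl]; exact List.mem_singleton.mpr rfl))⟩
          rw [hnil] at hmem
          cases hmem
      · intro hq
        apply List.flatMap_eq_nil_iff.mpr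
        intro y hy
        have hyk : y ≠ k := by
          intro h
          subst h
          have := (List.mem_filter.mp hy).2
          rw [hq] at this
          exact Bool.false_ne_true this
        rw [if_neg hxk, if_neg hyk]
        rfl
  · have h1 : (nodes.filter (pvPA data k)).flatMap
        (fun y => (if k = k then [y] else []) ++ (if y = k then [k] else []))
        = (nodes.filter (pvPA data k)).flatMap (fun y => [y]) := by
      apply List.flatMap_congr
      intro y hy
      have hky : k ≠ y := by
        have := (List.mem_filter.mp hy).2
        rw [pvPA, Bool.and_eq_true, decide_eq_true_eq] at this
        exact this.1
      rw [if_pos rfl, if_neg (fun h : y = k => hky h.symm)]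
      rfl
    rw [h1, List.flatMap_singleton']
    exact List.filter_congr (fun v _ => pv_PA_symm data k v)

theorem pv_nbrseq_B (data : List (String × List (String × Int))) (nodes : List String)
    (k : String) (hk : k ∈ pvUsers nodes) :
    PySem.Set.ofList (pvNbr k (pvLB data nodes))
      = (pvUsers nodes).filter (fun x => pvPB data nodes x k) := by
  rw [pv_nbr_LB]
  rw [show (pvUsers nodes).filter (fun x => pvPB data nodes x k)
      = (PySem.Set.ofList (pvUsers nodes)).filter (fun x => pvPB data nodes x k) by
    rw [pv_ofList_nodup_eq_self _ (pv_users_nodup nodes)]]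
  apply pv_seq (pvUsers nodes) k (fun x => pvPB data nodes x k)
  · exact hk
  · intro x hxk
    constructor
    · intro e he
      rcases List.mem_flatMap.mp he with ⟨y, _, he2⟩
      rcases List.mem_append.mp he2 with h | h
      · rw [if_neg hxk] at h; cases h
      · by_cases hyk : y = k
        · rw [if_pos hyk] at h; exact List.mem_singleton.mp h
        · rw [if_neg hyk] at h; cases h
    · constructor
      · intro hnil
        cases hq' : pvPB data nodes x k with
        | false => rfl
        | true =>
          have hkmem : k ∈ (pvUsers nodes).filter (fun v => pvPB data nodes x v) :=
            List.mem_filter.mpr ⟨hk, hq'⟩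
          have hmem : x ∈ ((pvUsers nodes).filter (fun v => pvPB data nodes x v)).flatMap
              (fun y => (if x = k then [y] else []) ++ (if y = k then [x] else [])) :=
            List.mem_flatMap.mpr ⟨k, hkmem, List.mem_append.mpr (Or.inr (by
              rw [if_pos rfl]; exact List.mem_singleton.mpr rfl))⟩
          rw [hnil] at hmem
          cases hmem
      · intro hq
        apply List.flatMap_eq_nil_iff.mpr
        intro y hy
        have hyk : y ≠ k := by
          intro h
          subst h
          have := (List.mem_filter.mp hy).2
          rw [hq] at this
          exact Bool.false_ne_true this
        rw [if_neg hxk, if_neg hyk]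
        rfl
  · have h1 : (((pvUsers nodes)).filter (fun v => pvPB data nodes k v)).flatMap
        (fun y => (if k = k then [y] else []) ++ (if y = k then [k] else []))
        = (((pvUsers nodes)).filter (fun v => pvPB data nodes k v)).flatMap (fun y => [y]) := by
      apply List.flatMap_congr
      intro y hy
      have hky : y ≠ k := by
        have := (List.mem_filter.mp hy).2
        rw [pvPB, Bool.and_eq_true, decide_eq_true_eq] at this
        exact this.1
      rw [if_pos rfl, if_neg hky]
      rfl
    rw [h1, List.flatMap_singleton']
    exact List.filter_congr (fun v _ => pv_PB_symm data nodes k v)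

theorem pv_mem_ends_LB (data : List (String × List (String × Int))) (nodes : List String)
    (k : String) (hk : k ∈ pvEnds (pvLB data nodes)) : k ∈ pvUsers nodes := by
  rw [pv_ends_LB] at hk
  rcases List.mem_flatMap.mp hk with ⟨x, hx, hk2⟩
  rcases List.mem_flatMap.mp hk2 with ⟨y, hy, hk3⟩
  rcases List.mem_cons.mp hk3 with h | h
  · exact h ▸ hx
  · rw [List.mem_singleton.mp h]
    exact (List.mem_filter.mp hy).1

theorem pv_main (data : List (String × List (String × Int))) (nodes : List String)
    (hnd : (data.map Prod.fst).Nodup) :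
    bipartite_projection data nodes = bipartite_projection_alt data nodes := by
  rw [pv_A_eq_foldl_step, pv_B_eq_foldl_step,
    pv_items_foldl_step _ (pv_hLA data nodes), pv_items_foldl_step _ (pv_hLB data nodes),
    pv_keyseq data nodes hnd]
  apply List.map_congr_left
  intro k hk
  have hku : k ∈ pvUsers nodes :=
    pv_mem_ends_LB data nodes k ((PySem.Set.mem_ofList _ _).mp hk)
  have hkn : k ∈ nodes := (pv_mem_users nodes k).mp hku
  have hres : PySem.Set.ofList (pvNbr k (pvLA data nodes))
      = PySem.Set.ofList (pvNbr k (pvLB data nodes)) := by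
    rw [pv_nbrseq_A data nodes k hkn, pv_nbrseq_B data nodes k hku, ← pv_users_eq]
    exact List.filter_congr (fun v hv => pv_PA_eq_PB data nodes hnd v k hv hku)
  rw [hres]

-- ===== VERDICT (by name: the statement is the Claim_ definition above) =====
theorem bipartite_projection_spec : Claim_equal_bipartite_projection := by
  intro data nodes _hdom hpre
  unfold Spec_bipartite_projection
  exact pv_main data nodes hpre.1
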